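-- pv_equiv track=rewrite | github.com/VoidedHeadPort/utils | exifdiff.py | transform_opcode_replace
-- ===== SOURCE A (Python) =====
-- def search_opcode_delete(metadata, i1, i2, j1, j2):
--     if i1 < i2:
--         if j1 < j2:
--             # Actually search for delete events
--             i = i1
--             while i < i2 and metadata[0][i] < metadata[1][j1]:
--                 i = i + 1
--             if i > i1:
--                 return ('delete', i1, i, j1, j1)
--             else:
--                 return None
--         else:
--             # Consume everything
--             return ('delete', i1, i2, j2, j2)
--     else:
--         return None
--
-- def search_opcode_insert(metadata, i1, i2, j1, j2):
--     if j1 < j2: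
--         if i1 < i2:
--             # Actually search for insert events
--             j = j1
--             while j < j2 and metadata[0][i1] > metadata[1][j]:
--                 j = j + 1
--             if j > j1:
--                 return ('insert', i1, i1, j1, j)
--             else:
--                 return None
--         else:
--             # Consume everything
--             return ('insert', i2, i2, j1, j2)
--     else:
--         return None
--
-- def transform_opcode_replace(metadata, opcode):
--     tag, i1, i2, j1, j2 = opcode
--     filtered = []
--
--     while i1 < i2 or j1 < j2:
--         opcode_delete = search_opcode_delete(metadata, i1, i2, j1, j2)
--         if opcode_delete:
--             i1 = opcode_delete[2]
--             filtered.append(opcode_delete)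
--
--         opcode_insert = search_opcode_insert(metadata, i1, i2, j1, j2)
--         if opcode_insert:
--             j1 = opcode_insert[4]
--             filtered.append(opcode_insert)
--
--         assert(opcode_insert or opcode_delete)
--
--     return filtered
-- ===== SOURCE B (Python) =====
-- def transform_opcode_replace(metadata, opcode):
--     tag, i1, i2, j1, j2 = opcode
--     # Phase 1: emit a stream of unit opcodes over the overlap (one per pointer
--     # step, raising on equal aligned heads exactly where A's assert fires),
--     # then the leftover side as one consume-everything opcode.
--     units = []
--     while i1 < i2 and j1 < j2:
--         a = metadata[0][i1]
--         b = metadata[1][j1]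
--         if a < b:
--             units.append(('delete', i1, i1 + 1, j1, j1))
--             i1 += 1
--         elif b < a:
--             units.append(('insert', i1, i1, j1, j1 + 1))
--             j1 += 1
--         else:
--             raise AssertionError
--     if i1 < i2:
--         units.append(('delete', i1, i2, j2, j2))
--     elif j1 < j2:
--         units.append(('insert', i2, i2, j1, j2))
--     # Phase 2: run-length coalesce adjacent contiguous unit opcodes of the same
--     # kind, back to front (out holds the result reversed).
--     out = []
--     for op in reversed(units):
--         if out:
--             u, c1, c2, d1, d2 = out[-1]
--             t, a1, a2, b1, b2 = op
--             if t == u and c1 == a2 and d1 == b2: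
--                 out[-1] = (t, a1, c2, b1, d2)
--                 continue
--         out.append(op)
--     return out[::-1]
-- ===== Notes on version B (the rewrite author's own statement) =====
-- stated objective: alternative
-- what changed: Instead of A's run-scanning merge (two Option-returning search helpers driven by a try-delete-then-try-insert loop), B first emits a flat stream of single-element unit opcodes over the overlap (plus one consume-everything tail opcode) and then a separate run-length coalescing pass merges contiguous same-kind units into A's run opcodes.
import Mathlib
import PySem

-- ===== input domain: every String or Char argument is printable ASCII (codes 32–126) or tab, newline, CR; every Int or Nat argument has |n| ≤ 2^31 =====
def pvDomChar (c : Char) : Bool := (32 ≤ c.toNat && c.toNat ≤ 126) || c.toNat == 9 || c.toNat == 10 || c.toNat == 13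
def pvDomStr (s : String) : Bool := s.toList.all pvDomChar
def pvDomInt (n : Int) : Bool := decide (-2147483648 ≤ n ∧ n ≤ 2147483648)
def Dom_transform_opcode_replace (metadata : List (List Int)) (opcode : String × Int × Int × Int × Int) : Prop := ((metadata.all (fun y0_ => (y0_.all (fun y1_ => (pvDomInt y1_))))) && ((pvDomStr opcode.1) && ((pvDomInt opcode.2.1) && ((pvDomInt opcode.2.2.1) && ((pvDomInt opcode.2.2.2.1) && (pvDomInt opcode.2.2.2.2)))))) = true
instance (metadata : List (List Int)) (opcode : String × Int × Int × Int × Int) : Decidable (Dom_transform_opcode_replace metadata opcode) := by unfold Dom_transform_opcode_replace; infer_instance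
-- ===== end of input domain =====

-- B replaces A's run-scanning merge (two search helpers + try-delete-then-try-insert driver) by a
-- unit-opcode stream followed by a separate run-length coalescing pass; equivalence is about the
-- return value on Pre_ inputs. While-loops are ported with an explicit fuel equal to the loop
-- measure, which provably suffices; the fuel only makes the same computation total.

-- shared Python indexing: metadata[r][i] (Python wrap semantics; default 0 outside Pre_, where the
-- Python raises IndexError)
def pvGet2 (m : List (List Int)) (r i : Int) : Int :=
  PySem.List.pyGetD (PySem.List.pyGetD m r []) i 0

-- ===== PORT A =====
-- inner while of search_opcode_delete: advance i while i < i2 and metadata[0][i] < b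
def pvScanDel (m : List (List Int)) (b i2 : Int) : Nat → Int → Int
  | 0, i => i
  | fuel + 1, i => if i < i2 ∧ pvGet2 m 0 i < b then pvScanDel m b i2 fuel (i + 1) else i

-- inner while of search_opcode_insert: advance j while j < j2 and a > metadata[1][j]
def pvScanIns (m : List (List Int)) (a j2 : Int) : Nat → Int → Int
  | 0, j => j
  | fuel + 1, j => if j < j2 ∧ a > pvGet2 m 1 j then pvScanIns m a j2 fuel (j + 1) else j

def search_opcode_delete (m : List (List Int)) (i1 i2 j1 j2 : Int) :
    Option (String × Int × Int × Int × Int) :=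
  if i1 < i2 then
    if j1 < j2 then
      if pvScanDel m (pvGet2 m 1 j1) i2 (i2 - i1).toNat i1 > i1 then
        some ("delete", i1, pvScanDel m (pvGet2 m 1 j1) i2 (i2 - i1).toNat i1, j1, j1)
      else none
    else some ("delete", i1, i2, j2, j2)
  else none

def search_opcode_insert (m : List (List Int)) (i1 i2 j1 j2 : Int) :
    Option (String × Int × Int × Int × Int) :=
  if j1 < j2 then
    if i1 < i2 then
      if pvScanIns m (pvGet2 m 0 i1) j2 (j2 - j1).toNat j1 > j1 then
        some ("insert", i1, i1, j1, pvScanIns m (pvGet2 m 0 i1) j2 (j2 - j1).toNat j1)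
      else none
    else some ("insert", i2, i2, j1, j2)
  else none

-- the driver while-loop of A; when both searches return None Python's assert fails
-- (AssertionError, excluded by Pre_), modelled by returning the list built so far
def pvALoopGo (m : List (List Int)) (i2 j2 : Int) :
    Nat → Int → Int → List (String × Int × Int × Int × Int)
  | 0, _, _ => []
  | fuel + 1, i1, j1 =>
    if i1 < i2 ∨ j1 < j2 then
      match search_opcode_delete m i1 i2 j1 j2 with
      | some d =>
        match search_opcode_insert m d.2.2.1 i2 j1 j2 with
        | some o => d :: o :: pvALoopGo m i2 j2 fuel d.2.2.1 o.2.2.2.2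
        | none => d :: pvALoopGo m i2 j2 fuel d.2.2.1 j1
      | none =>
        match search_opcode_insert m i1 i2 j1 j2 with
        | some o => o :: pvALoopGo m i2 j2 fuel i1 o.2.2.2.2
        | none => []
    else []

def transform_opcode_replace (metadata : List (List Int)) (opcode : String × Int × Int × Int × Int) :
    List (String × Int × Int × Int × Int) :=
  pvALoopGo metadata opcode.2.2.1 opcode.2.2.2.2
    ((opcode.2.2.1 - opcode.2.1).toNat + (opcode.2.2.2.2 - opcode.2.2.2.1).toNat)
    opcode.2.1 opcode.2.2.2.1

-- ===== PORT B =====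
-- Phase 1 of Source B: the while loop emitting one unit opcode per pointer step; at loop exit the
-- if/elif appends the leftover side as one consume-everything opcode. Equal aligned heads are
-- Python B's 'raise AssertionError' (excluded by Pre_), modelled by returning the units so far.
def pvBUnits (m : List (List Int)) (i2 j2 : Int) :
    Nat → Int → Int → List (String × Int × Int × Int × Int)
  | 0, _, _ => []
  | fuel + 1, i1, j1 =>
    if i1 < i2 ∧ j1 < j2 then
      if pvGet2 m 0 i1 < pvGet2 m 1 j1 then
        ("delete", i1, i1 + 1, j1, j1) :: pvBUnits m i2 j2 fuel (i1 + 1) j1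
      else if pvGet2 m 1 j1 < pvGet2 m 0 i1 then
        ("insert", i1, i1, j1, j1 + 1) :: pvBUnits m i2 j2 fuel i1 (j1 + 1)
      else []
    else if i1 < i2 then [("delete", i1, i2, j2, j2)]
    else if j1 < j2 then [("insert", i2, i2, j1, j2)]
    else []

-- Phase 2 of Source B: run-length coalescing. Source B iterates over reversed(units) keeping the result
-- reversed in 'out' and returns out[::-1]; that back-to-front loop is exactly this structural
-- right-recursion (each unit is merged into the head of the already-coalesced suffix when the
-- kinds match and the coordinates are contiguous).
def pvCoalesce : List (String × Int × Int × Int × Int) → List (String × Int × Int × Int × Int)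
  | [] => []
  | op :: rest =>
    match pvCoalesce rest with
    | [] => [op]
    | nxt :: tl =>
      if op.1 = nxt.1 ∧ nxt.2.1 = op.2.2.1 ∧ nxt.2.2.2.1 = op.2.2.2.2 then
        (op.1, op.2.1, nxt.2.2.1, op.2.2.2.1, nxt.2.2.2.2) :: tl
      else op :: nxt :: tl

def transform_opcode_replace_alt (metadata : List (List Int))
    (opcode : String × Int × Int × Int × Int) : List (String × Int × Int × Int × Int) :=
  pvCoalesce (pvBUnits metadata opcode.2.2.1 opcode.2.2.2.2
    ((opcode.2.2.1 - opcode.2.1).toNat + (opcode.2.2.2.2 - opcode.2.2.2.1).toNat)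
    opcode.2.1 opcode.2.2.2.1)

-- ===== PRECONDITION & SPEC =====
-- Pre_ excludes inputs where A raises: out-of-range windows (IndexError) and windows whose value
-- sets intersect (an aligned shared element fails A's assert, AssertionError); the disjointness
-- condition is a closed-form sufficient guard and is slightly narrower than the exact assert set —
-- on excluded unsorted inputs whose shared value never aligns, A and B both return the SAME value
-- (see the cite in claim.json); B raises AssertionError exactly where A does.
def Pre_transform_opcode_replace (metadata : List (List Int))
    (opcode : String × Int × Int × Int × Int) : Prop :=
  (opcode.2.1 < opcode.2.2.1 ∧ opcode.2.2.2.1 < opcode.2.2.2.2) →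
    (2 ≤ (metadata.length : Int) ∧
     -((PySem.List.pyGetD metadata 0 []).length : Int) ≤ opcode.2.1 ∧
     opcode.2.2.1 ≤ ((PySem.List.pyGetD metadata 0 []).length : Int) ∧
     -((PySem.List.pyGetD metadata 1 []).length : Int) ≤ opcode.2.2.2.1 ∧
     opcode.2.2.2.2 ≤ ((PySem.List.pyGetD metadata 1 []).length : Int) ∧
     ∀ x ∈ PySem.List.pyRange opcode.2.1 opcode.2.2.1 1,
       ∀ y ∈ PySem.List.pyRange opcode.2.2.2.1 opcode.2.2.2.2 1,
         pvGet2 metadata 0 x ≠ pvGet2 metadata 1 y)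

instance (metadata : List (List Int)) (opcode : String × Int × Int × Int × Int) :
    Decidable (Pre_transform_opcode_replace metadata opcode) := by
  unfold Pre_transform_opcode_replace; infer_instance

def pvWitness_transform_opcode_replace : List (List Int) × (String × Int × Int × Int × Int) :=
  ([[1, 3], [2, 4]], ("replace", 0, 2, 0, 2))

def Spec_transform_opcode_replace (metadata : List (List Int)) (opcode : String × Int × Int × Int × Int) (out : List (String × Int × Int × Int × Int)) : Prop := out = transform_opcode_replace_alt metadata opcode
instance (metadata : List (List Int)) (opcode : String × Int × Int × Int × Int) (out : List (String × Int × Int × Int × Int)) : Decidable (Spec_transform_opcode_replace metadata opcode out) := by unfold Spec_transform_opcode_replace; infer_instance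

-- ===== CLAIM (what is proved, stated in full; the proofs are below) =====
def Claim_equal_transform_opcode_replace : Prop := ∀ (metadata : List (List Int)) (opcode : String × Int × Int × Int × Int), Dom_transform_opcode_replace metadata opcode → Pre_transform_opcode_replace metadata opcode → Spec_transform_opcode_replace metadata opcode (transform_opcode_replace metadata opcode)

-- ===== LEMMAS AND PROOFS =====

theorem pvScanDel_ge (m : List (List Int)) (b i2 : Int) :
    ∀ (f : Nat) (i : Int), i ≤ pvScanDel m b i2 f i := by
  intro f
  induction f with
  | zero => intro i; simp [pvScanDel]
  | succ f ih =>
    intro i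
    rw [pvScanDel]
    split
    · have := ih (i + 1); omega
    · omega

theorem pvScanDel_le (m : List (List Int)) (b i2 : Int) :
    ∀ (f : Nat) (i : Int), i ≤ i2 → pvScanDel m b i2 f i ≤ i2 := by
  intro f
  induction f with
  | zero => intro i h; simpa [pvScanDel]
  | succ f ih =>
    intro i h
    rw [pvScanDel]
    split
    · exact ih (i + 1) (by omega)
    · omega

theorem pvScanDel_stop (m : List (List Int)) (b i2 : Int) :
    ∀ (f : Nat) (i : Int), (i2 - i).toNat ≤ f →
      ¬(pvScanDel m b i2 f i < i2 ∧ pvGet2 m 0 (pvScanDel m b i2 f i) < b) := by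
  intro f
  induction f with
  | zero => intro i h; simp [pvScanDel]; omega
  | succ f ih =>
    intro i h
    rw [pvScanDel]
    split
    · exact ih (i + 1) (by omega)
    · assumption

theorem pvScanDel_congr (m : List (List Int)) (b i2 : Int) :
    ∀ (f1 : Nat), ∀ (f2 : Nat) (i : Int), (i2 - i).toNat ≤ f1 → (i2 - i).toNat ≤ f2 →
      pvScanDel m b i2 f1 i = pvScanDel m b i2 f2 i := by
  intro f1
  induction f1 with
  | zero =>
    intro f2 i h1 h2
    have hi : ¬ i < i2 := by omega
    cases f2 with
    | zero => rfl
    | succ f2 => rw [pvScanDel, pvScanDel.eq_def]; simp [hi]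
  | succ f1 ih =>
    intro f2 i h1 h2
    by_cases hc : i < i2 ∧ pvGet2 m 0 i < b
    · cases f2 with
      | zero => omega
      | succ f2 =>
        rw [pvScanDel, pvScanDel]
        rw [if_pos hc, if_pos hc]
        exact ih f2 (i + 1) (by omega) (by omega)
    · cases f2 with
      | zero => rw [pvScanDel, pvScanDel.eq_def]; simp [hc]
      | succ f2 => rw [pvScanDel, pvScanDel, if_neg hc, if_neg hc]

theorem pvScanIns_ge (m : List (List Int)) (a j2 : Int) :
    ∀ (f : Nat) (j : Int), j ≤ pvScanIns m a j2 f j := by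
  intro f
  induction f with
  | zero => intro j; simp [pvScanIns]
  | succ f ih =>
    intro j
    rw [pvScanIns]
    split
    · have := ih (j + 1); omega
    · omega

theorem pvScanIns_le (m : List (List Int)) (a j2 : Int) :
    ∀ (f : Nat) (j : Int), j ≤ j2 → pvScanIns m a j2 f j ≤ j2 := by
  intro f
  induction f with
  | zero => intro j h; simpa [pvScanIns]
  | succ f ih =>
    intro j h
    rw [pvScanIns]
    split
    · exact ih (j + 1) (by omega)
    · omega

theorem pvScanIns_congr (m : List (List Int)) (a j2 : Int) :
    ∀ (f1 : Nat), ∀ (f2 : Nat) (j : Int), (j2 - j).toNat ≤ f1 → (j2 - j).toNat ≤ f2 →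
      pvScanIns m a j2 f1 j = pvScanIns m a j2 f2 j := by
  intro f1
  induction f1 with
  | zero =>
    intro f2 j h1 h2
    have hj : ¬ j < j2 := by omega
    cases f2 with
    | zero => rfl
    | succ f2 => rw [pvScanIns, pvScanIns.eq_def]; simp [hj]
  | succ f1 ih =>
    intro f2 j h1 h2
    by_cases hc : j < j2 ∧ a > pvGet2 m 1 j
    · cases f2 with
      | zero => omega
      | succ f2 =>
        rw [pvScanIns, pvScanIns]
        rw [if_pos hc, if_pos hc]
        exact ih f2 (j + 1) (by omega) (by omega)
    · cases f2 with
      | zero => rw [pvScanIns, pvScanIns.eq_def]; simp [hc]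
      | succ f2 => rw [pvScanIns, pvScanIns, if_neg hc, if_neg hc]

-- proof-only ghost: A's output at run granularity (one opcode per emitted run)
def pvRunLoop (m : List (List Int)) (i2 j2 : Int) :
    Nat → Int → Int → List (String × Int × Int × Int × Int)
  | 0, _, _ => []
  | fuel + 1, i1, j1 =>
    if i1 < i2 ∧ j1 < j2 then
      if pvGet2 m 0 i1 < pvGet2 m 1 j1 then
        ("delete", i1, pvScanDel m (pvGet2 m 1 j1) i2 (i2 - (i1 + 1)).toNat (i1 + 1), j1, j1) ::
          pvRunLoop m i2 j2 fuel (pvScanDel m (pvGet2 m 1 j1) i2 (i2 - (i1 + 1)).toNat (i1 + 1)) j1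
      else if pvGet2 m 1 j1 < pvGet2 m 0 i1 then
        ("insert", i1, i1, j1, pvScanIns m (pvGet2 m 0 i1) j2 (j2 - (j1 + 1)).toNat (j1 + 1)) ::
          pvRunLoop m i2 j2 fuel i1 (pvScanIns m (pvGet2 m 0 i1) j2 (j2 - (j1 + 1)).toNat (j1 + 1))
      else []
    else if i1 < i2 then [("delete", i1, i2, j2, j2)]
    else if j1 < j2 then [("insert", i2, i2, j1, j2)]
    else []

-- the loop invariant: values in the remaining windows never coincide
def pvDisj (m : List (List Int)) (i1 i2 j1 j2 : Int) : Prop :=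
  ∀ x y, i1 ≤ x → x < i2 → j1 ≤ y → y < j2 → pvGet2 m 0 x ≠ pvGet2 m 1 y

theorem pvALoopGo_exit (m : List (List Int)) (i2 j2 : Int) (f : Nat) (i1 j1 : Int)
    (h : ¬(i1 < i2 ∨ j1 < j2)) : pvALoopGo m i2 j2 f i1 j1 = [] := by
  cases f with
  | zero => rfl
  | succ f => rw [pvALoopGo, if_neg h]

theorem pvRunLoop_exit (m : List (List Int)) (i2 j2 : Int) (f : Nat) (i1 j1 : Int)
    (h1 : ¬ i1 < i2) (h2 : ¬ j1 < j2) : pvRunLoop m i2 j2 f i1 j1 = [] := by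
  cases f with
  | zero => rfl
  | succ f => rw [pvRunLoop, if_neg (by omega), if_neg h1, if_neg h2]

theorem pvALoop_eq_runloop (m : List (List Int)) (i2 j2 : Int) :
    ∀ (fA : Nat), ∀ (fB : Nat) (i1 j1 : Int),
      (i2 - i1).toNat + (j2 - j1).toNat ≤ fA → (i2 - i1).toNat + (j2 - j1).toNat ≤ fB →
      pvDisj m i1 i2 j1 j2 → pvALoopGo m i2 j2 fA i1 j1 = pvRunLoop m i2 j2 fB i1 j1 := by
  intro fA
  induction fA with
  | zero =>
    intro fB i1 j1 hA hB _
    have hi : ¬ i1 < i2 := by omega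
    have hj : ¬ j1 < j2 := by omega
    cases fB with
    | zero => rfl
    | succ fB => rw [pvALoopGo, pvRunLoop]; simp [hi, hj]
  | succ fA ih =>
    intro fB i1 j1 hA hB hinv
    by_cases hi : i1 < i2
    · by_cases hj : j1 < j2
      · -- both windows nonempty: compare the aligned heads
        obtain ⟨fB', hfB⟩ : ∃ f, fB = f + 1 := ⟨fB - 1, by omega⟩
        subst hfB
        have hab : pvGet2 m 0 i1 ≠ pvGet2 m 1 j1 := hinv i1 j1 (le_refl _) hi (le_refl _) hj
        rcases lt_or_gt_of_ne hab with hlt | hgt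
        · -- metadata[0][i1] < metadata[1][j1] : delete run first
          obtain ⟨k, hk⟩ : ∃ k, (i2 - i1).toNat = k + 1 := ⟨(i2 - i1).toNat - 1, by omega⟩
          have hstep : pvScanDel m (pvGet2 m 1 j1) i2 (i2 - i1).toNat i1 =
              pvScanDel m (pvGet2 m 1 j1) i2 k (i1 + 1) := by
            rw [hk, pvScanDel, if_pos ⟨hi, hlt⟩]
          have hBrun : pvScanDel m (pvGet2 m 1 j1) i2 (i2 - (i1 + 1)).toNat (i1 + 1) =
              pvScanDel m (pvGet2 m 1 j1) i2 k (i1 + 1) :=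
            pvScanDel_congr m (pvGet2 m 1 j1) i2 _ k (i1 + 1) (by omega) (by omega)
          have hige : i1 + 1 ≤ pvScanDel m (pvGet2 m 1 j1) i2 k (i1 + 1) :=
            pvScanDel_ge m (pvGet2 m 1 j1) i2 k (i1 + 1)
          have hile : pvScanDel m (pvGet2 m 1 j1) i2 k (i1 + 1) ≤ i2 :=
            pvScanDel_le m (pvGet2 m 1 j1) i2 k (i1 + 1) (by omega)
          have hdel : search_opcode_delete m i1 i2 j1 j2 =
              some ("delete", i1, pvScanDel m (pvGet2 m 1 j1) i2 k (i1 + 1), j1, j1) := by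
            unfold search_opcode_delete
            rw [if_pos hi, if_pos hj, hstep, if_pos (by omega)]
          have hstop := pvScanDel_stop m (pvGet2 m 1 j1) i2 k (i1 + 1) (by omega)
          rw [pvALoopGo, if_pos (Or.inl hi)]
          simp only [hdel]
          rw [pvRunLoop, if_pos ⟨hi, hj⟩, if_pos hlt, hBrun]
          by_cases hii : pvScanDel m (pvGet2 m 1 j1) i2 k (i1 + 1) < i2
          · -- the delete run stopped inside the window: its head is > b, an insert run follows
            have hgt' : pvGet2 m 1 j1 <
                pvGet2 m 0 (pvScanDel m (pvGet2 m 1 j1) i2 k (i1 + 1)) := by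
              have hne := hinv (pvScanDel m (pvGet2 m 1 j1) i2 k (i1 + 1)) j1
                (by omega) hii (le_refl _) hj
              omega
            obtain ⟨l, hl⟩ : ∃ l, (j2 - j1).toNat = l + 1 := ⟨(j2 - j1).toNat - 1, by omega⟩
            have histep : pvScanIns m (pvGet2 m 0 (pvScanDel m (pvGet2 m 1 j1) i2 k (i1 + 1)))
                j2 (j2 - j1).toNat j1 =
                pvScanIns m (pvGet2 m 0 (pvScanDel m (pvGet2 m 1 j1) i2 k (i1 + 1)))
                j2 l (j1 + 1) := by
              rw [hl, pvScanIns, if_pos ⟨hj, by omega⟩]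
            have hBins : pvScanIns m (pvGet2 m 0 (pvScanDel m (pvGet2 m 1 j1) i2 k (i1 + 1)))
                j2 (j2 - (j1 + 1)).toNat (j1 + 1) =
                pvScanIns m (pvGet2 m 0 (pvScanDel m (pvGet2 m 1 j1) i2 k (i1 + 1)))
                j2 l (j1 + 1) :=
              pvScanIns_congr m _ j2 _ l (j1 + 1) (by omega) (by omega)
            have hjge := pvScanIns_ge m
              (pvGet2 m 0 (pvScanDel m (pvGet2 m 1 j1) i2 k (i1 + 1))) j2 l (j1 + 1)
            have hjle := pvScanIns_le m
              (pvGet2 m 0 (pvScanDel m (pvGet2 m 1 j1) i2 k (i1 + 1))) j2 l (j1 + 1) (by omega)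
            have hins : search_opcode_insert m (pvScanDel m (pvGet2 m 1 j1) i2 k (i1 + 1))
                i2 j1 j2 =
                some ("insert", pvScanDel m (pvGet2 m 1 j1) i2 k (i1 + 1),
                  pvScanDel m (pvGet2 m 1 j1) i2 k (i1 + 1), j1,
                  pvScanIns m (pvGet2 m 0 (pvScanDel m (pvGet2 m 1 j1) i2 k (i1 + 1)))
                    j2 l (j1 + 1)) := by
              unfold search_opcode_insert
              rw [if_pos hj, if_pos hii, histep, if_pos (by omega)]
            simp only [hins]
            congr 1
            obtain ⟨fB'', hfB'⟩ : ∃ f, fB' = f + 1 := ⟨fB' - 1, by omega⟩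
            subst hfB'
            rw [pvRunLoop, if_pos ⟨hii, hj⟩, if_neg (by omega), if_pos hgt', hBins]
            congr 1
            exact ih _ _ _ (by omega) (by omega)
              (fun x y hx1 hx2 hy1 hy2 => hinv x y (by omega) hx2 (by omega) hy2)
          · -- the delete run consumed the left window: a consuming insert follows
            have hins : search_opcode_insert m (pvScanDel m (pvGet2 m 1 j1) i2 k (i1 + 1))
                i2 j1 j2 = some ("insert", i2, i2, j1, j2) := by
              unfold search_opcode_insert
              rw [if_pos hj, if_neg (by omega)]
            simp only [hins]
            congr 1
            obtain ⟨fB'', hfB'⟩ : ∃ f, fB' = f + 1 := ⟨fB' - 1, by omega⟩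
            subst hfB'
            rw [pvALoopGo_exit m i2 j2 fA _ j2 (by omega),
              pvRunLoop, if_neg (by omega), if_neg (by omega), if_pos hj]
        · -- metadata[0][i1] > metadata[1][j1] : no delete, an insert run
          have hscan : pvScanDel m (pvGet2 m 1 j1) i2 (i2 - i1).toNat i1 = i1 := by
            obtain ⟨k, hk⟩ : ∃ k, (i2 - i1).toNat = k + 1 := ⟨(i2 - i1).toNat - 1, by omega⟩
            rw [hk, pvScanDel, if_neg (by omega)]
          have hdel : search_opcode_delete m i1 i2 j1 j2 = none := by
            unfold search_opcode_delete
            rw [if_pos hi, if_pos hj, hscan, if_neg (by omega)]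
          obtain ⟨l, hl⟩ : ∃ l, (j2 - j1).toNat = l + 1 := ⟨(j2 - j1).toNat - 1, by omega⟩
          have histep : pvScanIns m (pvGet2 m 0 i1) j2 (j2 - j1).toNat j1 =
              pvScanIns m (pvGet2 m 0 i1) j2 l (j1 + 1) := by
            rw [hl, pvScanIns, if_pos ⟨hj, by omega⟩]
          have hBins : pvScanIns m (pvGet2 m 0 i1) j2 (j2 - (j1 + 1)).toNat (j1 + 1) =
              pvScanIns m (pvGet2 m 0 i1) j2 l (j1 + 1) :=
            pvScanIns_congr m _ j2 _ l (j1 + 1) (by omega) (by omega)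
          have hjge := pvScanIns_ge m (pvGet2 m 0 i1) j2 l (j1 + 1)
          have hjle := pvScanIns_le m (pvGet2 m 0 i1) j2 l (j1 + 1) (by omega)
          have hins : search_opcode_insert m i1 i2 j1 j2 =
              some ("insert", i1, i1, j1, pvScanIns m (pvGet2 m 0 i1) j2 l (j1 + 1)) := by
            unfold search_opcode_insert
            rw [if_pos hj, if_pos hi, histep, if_pos (by omega)]
          rw [pvALoopGo, if_pos (Or.inl hi)]
          simp only [hdel, hins]
          rw [pvRunLoop, if_pos ⟨hi, hj⟩, if_neg (by omega), if_pos (by omega), hBins]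
          congr 1
          exact ih _ _ _ (by omega) (by omega)
            (fun x y hx1 hx2 hy1 hy2 => hinv x y hx1 hx2 (by omega) hy2)
      · -- only the left window remains: one consuming delete
        have hdel : search_opcode_delete m i1 i2 j1 j2 = some ("delete", i1, i2, j2, j2) := by
          unfold search_opcode_delete
          rw [if_pos hi, if_neg hj]
        have hins : search_opcode_insert m i2 i2 j1 j2 = none := by
          unfold search_opcode_insert
          rw [if_neg hj]
        rw [pvALoopGo, if_pos (Or.inl hi)]
        simp only [hdel, hins]
        obtain ⟨fB', hfB⟩ : ∃ f, fB = f + 1 := ⟨fB - 1, by omega⟩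
        subst hfB
        rw [pvALoopGo_exit m i2 j2 fA i2 j1 (by omega)]
        rw [pvRunLoop]
        rw [if_neg (show ¬(i1 < i2 ∧ j1 < j2) by omega)]
        rw [if_pos hi]
    · by_cases hj : j1 < j2
      · -- only the right window remains: one consuming insert
        have hdel : search_opcode_delete m i1 i2 j1 j2 = none := by
          unfold search_opcode_delete
          rw [if_neg hi]
        have hins : search_opcode_insert m i1 i2 j1 j2 = some ("insert", i2, i2, j1, j2) := by
          unfold search_opcode_insert
          rw [if_pos hj, if_neg hi]
        rw [pvALoopGo, if_pos (Or.inr hj)]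
        simp only [hdel, hins]
        obtain ⟨fB', hfB⟩ : ∃ f, fB = f + 1 := ⟨fB - 1, by omega⟩
        subst hfB
        rw [pvALoopGo_exit m i2 j2 fA i1 j2 (by omega),
          pvRunLoop, if_neg (by omega), if_neg hi, if_pos hj]
      · rw [pvALoopGo_exit m i2 j2 (fA + 1) i1 j1 (by omega),
          pvRunLoop_exit m i2 j2 fB i1 j1 hi hj]

theorem pvPre_disj (m : List (List Int)) (i1 i2 j1 j2 : Int)
    (h : ∀ x ∈ PySem.List.pyRange i1 i2 1, ∀ y ∈ PySem.List.pyRange j1 j2 1,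
        pvGet2 m 0 x ≠ pvGet2 m 1 y) : pvDisj m i1 i2 j1 j2 := by
  intro x y hx1 hx2 hy1 hy2
  exact h x (by rw [PySem.List.mem_pyRange_one]; omega)
    y (by rw [PySem.List.mem_pyRange_one]; omega)

-- fuel irrelevance for the unit stream
theorem pvBUnits_congr (m : List (List Int)) (i2 j2 : Int) :
    ∀ (f1 : Nat), ∀ (f2 : Nat) (i1 j1 : Int),
      (i2 - i1).toNat + (j2 - j1).toNat ≤ f1 → (i2 - i1).toNat + (j2 - j1).toNat ≤ f2 →
      pvBUnits m i2 j2 f1 i1 j1 = pvBUnits m i2 j2 f2 i1 j1 := by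
  intro f1
  induction f1 with
  | zero =>
    intro f2 i1 j1 h1 h2
    have hi : ¬ i1 < i2 := by omega
    have hj : ¬ j1 < j2 := by omega
    cases f2 with
    | zero => rfl
    | succ f2 =>
      rw [pvBUnits, pvBUnits.eq_def]
      simp [hi, hj]
  | succ f1 ih =>
    intro f2 i1 j1 h1 h2
    by_cases hw : i1 < i2 ∧ j1 < j2
    · obtain ⟨f2', rfl⟩ : ∃ f, f2 = f + 1 := ⟨f2 - 1, by omega⟩
      rw [pvBUnits, pvBUnits, if_pos hw, if_pos hw]
      by_cases hlt : pvGet2 m 0 i1 < pvGet2 m 1 j1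
      · rw [if_pos hlt, if_pos hlt, ih f2' (i1 + 1) j1 (by omega) (by omega)]
      · rw [if_neg hlt, if_neg hlt]
        by_cases hgt : pvGet2 m 1 j1 < pvGet2 m 0 i1
        · rw [if_pos hgt, if_pos hgt, ih f2' i1 (j1 + 1) (by omega) (by omega)]
        · rw [if_neg hgt, if_neg hgt]
    · cases f2 with
      | zero =>
        simp only [pvBUnits]
        rw [if_neg hw, if_neg (show ¬ i1 < i2 by omega), if_neg (show ¬ j1 < j2 by omega)]
      | succ f2 => rw [pvBUnits, pvBUnits, if_neg hw, if_neg hw]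

-- cons-step equations for pvCoalesce
theorem pvCoalesce_cons_nil (op : String × Int × Int × Int × Int)
    (l : List (String × Int × Int × Int × Int)) (h : pvCoalesce l = []) :
    pvCoalesce (op :: l) = [op] := by
  rw [pvCoalesce, h]

theorem pvCoalesce_cons_merge (t : String) (a1 a2 b1 b2 c2 d2 : Int)
    (tl l : List (String × Int × Int × Int × Int))
    (h : pvCoalesce l = (t, a2, c2, b2, d2) :: tl) :
    pvCoalesce ((t, a1, a2, b1, b2) :: l) = (t, a1, c2, b1, d2) :: tl := by
  simp [pvCoalesce, h]

theorem pvCoalesce_cons_diff (t : String) (a1 a2 b1 b2 : Int)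
    (nxt : String × Int × Int × Int × Int)
    (tl l : List (String × Int × Int × Int × Int))
    (h : pvCoalesce l = nxt :: tl) (hne : t ≠ nxt.1) :
    pvCoalesce ((t, a1, a2, b1, b2) :: l) = (t, a1, a2, b1, b2) :: nxt :: tl := by
  rw [pvCoalesce, h]
  exact if_neg (by rintro ⟨h1, -⟩; exact hne h1)

-- the head of a coalesced cons keeps the first opcode's tag
theorem pvCoalesce_head_tag (op : String × Int × Int × Int × Int)
    (l : List (String × Int × Int × Int × Int)) :
    ∃ nxt tl, pvCoalesce (op :: l) = nxt :: tl ∧ nxt.1 = op.1 := by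
  rw [pvCoalesce]
  cases h : pvCoalesce l with
  | nil => exact ⟨op, [], rfl, rfl⟩
  | cons nxt tl =>
    by_cases hc : op.1 = nxt.1 ∧ nxt.2.1 = op.2.2.1 ∧ nxt.2.2.2.1 = op.2.2.2.2
    · exact ⟨_, tl, if_pos hc, rfl⟩
    · exact ⟨op, nxt :: tl, if_neg hc, rfl⟩

-- coalescing the tail opcode (already run-sized) is the identity
theorem pvCoalesce_tail (i2 j2 i1 j1 : Int) :
    pvCoalesce (if i1 < i2 then [(("delete" : String), i1, i2, j2, j2)]
      else if j1 < j2 then [(("insert" : String), i2, i2, j1, j2)] else []) =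
    (if i1 < i2 then [(("delete" : String), i1, i2, j2, j2)]
     else if j1 < j2 then [(("insert" : String), i2, i2, j1, j2)] else []) := by
  split_ifs <;> simp [pvCoalesce]

-- after a finished delete run the coalesced remainder is empty or starts with an insert opcode
theorem pvBUnits_head_ins (m : List (List Int)) (i2 j2 : Int) (f : Nat) (i1 j1 : Int)
    (hf : (i2 - i1).toNat + (j2 - j1).toNat ≤ f) (hj : j1 < j2)
    (hni : i1 < i2 → ¬ pvGet2 m 0 i1 < pvGet2 m 1 j1) :
    pvCoalesce (pvBUnits m i2 j2 f i1 j1) = [] ∨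
      ∃ nxt tl, pvCoalesce (pvBUnits m i2 j2 f i1 j1) = nxt :: tl ∧ nxt.1 = "insert" := by
  obtain ⟨g, rfl⟩ : ∃ g, f = g + 1 := ⟨f - 1, by omega⟩
  rw [pvBUnits]
  by_cases hi : i1 < i2
  · rw [if_pos ⟨hi, hj⟩, if_neg (hni hi)]
    by_cases hgt : pvGet2 m 1 j1 < pvGet2 m 0 i1
    · rw [if_pos hgt]
      obtain ⟨nxt, tl, heq, htag⟩ := pvCoalesce_head_tag
        (("insert" : String), i1, i1, j1, j1 + 1) (pvBUnits m i2 j2 g i1 (j1 + 1))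
      exact Or.inr ⟨nxt, tl, heq, htag⟩
    · rw [if_neg hgt]; exact Or.inl rfl
  · rw [if_neg (by tauto), if_neg hi, if_pos hj]
    obtain ⟨nxt, tl, heq, htag⟩ := pvCoalesce_head_tag (("insert" : String), i2, i2, j1, j2) []
    exact Or.inr ⟨nxt, tl, heq, htag⟩

-- after a finished insert run the coalesced remainder is empty or starts with a delete opcode
theorem pvBUnits_head_del (m : List (List Int)) (i2 j2 : Int) (f : Nat) (i1 j1 : Int)
    (hf : (i2 - i1).toNat + (j2 - j1).toNat ≤ f) (hi : i1 < i2)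
    (hnj : j1 < j2 → ¬ pvGet2 m 1 j1 < pvGet2 m 0 i1) :
    pvCoalesce (pvBUnits m i2 j2 f i1 j1) = [] ∨
      ∃ nxt tl, pvCoalesce (pvBUnits m i2 j2 f i1 j1) = nxt :: tl ∧ nxt.1 = "delete" := by
  obtain ⟨g, rfl⟩ : ∃ g, f = g + 1 := ⟨f - 1, by omega⟩
  rw [pvBUnits]
  by_cases hj : j1 < j2
  · rw [if_pos ⟨hi, hj⟩]
    by_cases hlt : pvGet2 m 0 i1 < pvGet2 m 1 j1
    · rw [if_pos hlt]
      obtain ⟨nxt, tl, heq, htag⟩ := pvCoalesce_head_tag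
        (("delete" : String), i1, i1 + 1, j1, j1) (pvBUnits m i2 j2 g (i1 + 1) j1)
      exact Or.inr ⟨nxt, tl, heq, htag⟩
    · rw [if_neg hlt, if_neg (hnj hj)]; exact Or.inl rfl
  · rw [if_neg (by tauto), if_pos hi]
    obtain ⟨nxt, tl, heq, htag⟩ := pvCoalesce_head_tag (("delete" : String), i1, i2, j2, j2) []
    exact Or.inr ⟨nxt, tl, heq, htag⟩

-- peel one whole delete run off the coalesced unit stream
theorem pvDRun (m : List (List Int)) (i2 j2 j1 : Int) (hj : j1 < j2) :
    ∀ (f : Nat) (i1 : Int), (i2 - i1).toNat + (j2 - j1).toNat ≤ f → i1 < i2 →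
      pvGet2 m 0 i1 < pvGet2 m 1 j1 → pvDisj m i1 i2 j1 j2 →
      pvCoalesce (pvBUnits m i2 j2 f i1 j1) =
        ("delete", i1, pvScanDel m (pvGet2 m 1 j1) i2 (i2 - (i1 + 1)).toNat (i1 + 1), j1, j1) ::
          pvCoalesce (pvBUnits m i2 j2 f
            (pvScanDel m (pvGet2 m 1 j1) i2 (i2 - (i1 + 1)).toNat (i1 + 1)) j1) := by
  intro f
  induction f with
  | zero => intro i1 h hi _ _; omega
  | succ g ih =>
    intro i1 hf hi hlt hinv
    rw [pvBUnits, if_pos ⟨hi, hj⟩, if_pos hlt]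
    by_cases hc : i1 + 1 < i2 ∧ pvGet2 m 0 (i1 + 1) < pvGet2 m 1 j1
    · -- the run continues at i1 + 1
      have hs : pvScanDel m (pvGet2 m 1 j1) i2 (i2 - (i1 + 1)).toNat (i1 + 1) =
          pvScanDel m (pvGet2 m 1 j1) i2 (i2 - (i1 + 1 + 1)).toNat (i1 + 1 + 1) := by
        obtain ⟨k, hk⟩ : ∃ k, (i2 - (i1 + 1)).toNat = k + 1 := ⟨(i2 - (i1 + 1)).toNat - 1, by omega⟩
        rw [hk, pvScanDel, if_pos hc]
        exact pvScanDel_congr m _ i2 k _ (i1 + 1 + 1) (by omega) (by omega)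
      have hge := pvScanDel_ge m (pvGet2 m 1 j1) i2 (i2 - (i1 + 1 + 1)).toNat (i1 + 1 + 1)
      have hle := pvScanDel_le m (pvGet2 m 1 j1) i2 (i2 - (i1 + 1 + 1)).toNat (i1 + 1 + 1)
        (by omega)
      have hrest := ih (i1 + 1) (by omega) hc.1 hc.2
        (fun x y hx1 hx2 hy1 hy2 => hinv x y (by omega) hx2 hy1 hy2)
      rw [pvCoalesce_cons_merge "delete" i1 (i1 + 1) j1 j1
        (pvScanDel m (pvGet2 m 1 j1) i2 (i2 - (i1 + 1 + 1)).toNat (i1 + 1 + 1)) j1 _ _ hrest,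
        hs, pvBUnits_congr m i2 j2 g (g + 1)
          (pvScanDel m (pvGet2 m 1 j1) i2 (i2 - (i1 + 1 + 1)).toNat (i1 + 1 + 1)) j1
          (by omega) (by omega)]
    · -- the run ends: the scan stops at i1 + 1
      have hs : pvScanDel m (pvGet2 m 1 j1) i2 (i2 - (i1 + 1)).toNat (i1 + 1) = i1 + 1 := by
        by_cases h2 : i1 + 1 < i2
        · obtain ⟨k, hk⟩ : ∃ k, (i2 - (i1 + 1)).toNat = k + 1 :=
            ⟨(i2 - (i1 + 1)).toNat - 1, by omega⟩
          rw [hk, pvScanDel, if_neg (by tauto)]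
        · rw [show (i2 - (i1 + 1)).toNat = 0 by omega, pvScanDel]
      rw [hs]
      have hcongr := pvBUnits_congr m i2 j2 g (g + 1) (i1 + 1) j1 (by omega) (by omega)
      rcases pvBUnits_head_ins m i2 j2 g (i1 + 1) j1 (by omega) hj
          (fun h2 hv => hc ⟨h2, hv⟩) with hnil | ⟨nxt, tl, heq, htag⟩
      · rw [pvCoalesce_cons_nil _ _ hnil, ← hcongr, hnil]
      · rw [pvCoalesce_cons_diff "delete" i1 (i1 + 1) j1 j1 nxt tl _ heq
          (by rw [htag]; decide), ← hcongr, heq]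

-- peel one whole insert run off the coalesced unit stream
theorem pvIRun (m : List (List Int)) (i2 j2 i1 : Int) (hi : i1 < i2) :
    ∀ (f : Nat) (j1 : Int), (i2 - i1).toNat + (j2 - j1).toNat ≤ f → j1 < j2 →
      pvGet2 m 1 j1 < pvGet2 m 0 i1 → pvDisj m i1 i2 j1 j2 →
      pvCoalesce (pvBUnits m i2 j2 f i1 j1) =
        ("insert", i1, i1, j1, pvScanIns m (pvGet2 m 0 i1) j2 (j2 - (j1 + 1)).toNat (j1 + 1)) ::
          pvCoalesce (pvBUnits m i2 j2 f i1
            (pvScanIns m (pvGet2 m 0 i1) j2 (j2 - (j1 + 1)).toNat (j1 + 1))) := by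
  intro f
  induction f with
  | zero => intro j1 h hj _ _; omega
  | succ g ih =>
    intro j1 hf hj hgt hinv
    have hne : ¬ pvGet2 m 0 i1 < pvGet2 m 1 j1 := by omega
    rw [pvBUnits, if_pos ⟨hi, hj⟩, if_neg hne, if_pos hgt]
    by_cases hc : j1 + 1 < j2 ∧ pvGet2 m 1 (j1 + 1) < pvGet2 m 0 i1
    · -- the run continues at j1 + 1
      have hs : pvScanIns m (pvGet2 m 0 i1) j2 (j2 - (j1 + 1)).toNat (j1 + 1) =
          pvScanIns m (pvGet2 m 0 i1) j2 (j2 - (j1 + 1 + 1)).toNat (j1 + 1 + 1) := by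
        obtain ⟨k, hk⟩ : ∃ k, (j2 - (j1 + 1)).toNat = k + 1 := ⟨(j2 - (j1 + 1)).toNat - 1, by omega⟩
        rw [hk, pvScanIns, if_pos ⟨hc.1, hc.2⟩]
        exact pvScanIns_congr m _ j2 k _ (j1 + 1 + 1) (by omega) (by omega)
      have hge := pvScanIns_ge m (pvGet2 m 0 i1) j2 (j2 - (j1 + 1 + 1)).toNat (j1 + 1 + 1)
      have hle := pvScanIns_le m (pvGet2 m 0 i1) j2 (j2 - (j1 + 1 + 1)).toNat (j1 + 1 + 1)
        (by omega)
      have hrest := ih (j1 + 1) (by omega) hc.1 hc.2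
        (fun x y hx1 hx2 hy1 hy2 => hinv x y hx1 hx2 (by omega) hy2)
      rw [pvCoalesce_cons_merge "insert" i1 i1 j1 (j1 + 1) i1
        (pvScanIns m (pvGet2 m 0 i1) j2 (j2 - (j1 + 1 + 1)).toNat (j1 + 1 + 1)) _ _ hrest,
        hs, pvBUnits_congr m i2 j2 g (g + 1) i1
          (pvScanIns m (pvGet2 m 0 i1) j2 (j2 - (j1 + 1 + 1)).toNat (j1 + 1 + 1))
          (by omega) (by omega)]
    · -- the run ends: the scan stops at j1 + 1
      have hs : pvScanIns m (pvGet2 m 0 i1) j2 (j2 - (j1 + 1)).toNat (j1 + 1) = j1 + 1 := by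
        by_cases h2 : j1 + 1 < j2
        · obtain ⟨k, hk⟩ : ∃ k, (j2 - (j1 + 1)).toNat = k + 1 :=
            ⟨(j2 - (j1 + 1)).toNat - 1, by omega⟩
          rw [hk, pvScanIns, if_neg (by rintro ⟨ha, hb⟩; exact hc ⟨ha, hb⟩)]
        · rw [show (j2 - (j1 + 1)).toNat = 0 by omega, pvScanIns]
      rw [hs]
      have hcongr := pvBUnits_congr m i2 j2 g (g + 1) i1 (j1 + 1) (by omega) (by omega)
      rcases pvBUnits_head_del m i2 j2 g i1 (j1 + 1) (by omega) hi
          (fun h2 hv => hc ⟨h2, hv⟩) with hnil | ⟨nxt, tl, heq, htag⟩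
      · rw [pvCoalesce_cons_nil _ _ hnil, ← hcongr, hnil]
      · rw [pvCoalesce_cons_diff "insert" i1 i1 j1 (j1 + 1) nxt tl _ heq
          (by rw [htag]; decide), ← hcongr, heq]

-- run-level loop = coalesced unit stream
theorem pvMain (m : List (List Int)) (i2 j2 : Int) :
    ∀ (fR : Nat), ∀ (fB : Nat) (i1 j1 : Int),
      (i2 - i1).toNat + (j2 - j1).toNat ≤ fR → (i2 - i1).toNat + (j2 - j1).toNat ≤ fB →
      pvDisj m i1 i2 j1 j2 →
      pvRunLoop m i2 j2 fR i1 j1 = pvCoalesce (pvBUnits m i2 j2 fB i1 j1) := by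
  intro fR
  induction fR with
  | zero =>
    intro fB i1 j1 hR hB _
    have hi : ¬ i1 < i2 := by omega
    have hj : ¬ j1 < j2 := by omega
    cases fB with
    | zero => rfl
    | succ fB =>
      rw [pvBUnits, if_neg (by tauto), pvCoalesce_tail i2 j2 i1 j1, if_neg hi, if_neg hj]
      rfl
  | succ fR ih =>
    intro fB i1 j1 hR hB hinv
    by_cases hw : i1 < i2 ∧ j1 < j2
    · have hab : pvGet2 m 0 i1 ≠ pvGet2 m 1 j1 :=
        hinv i1 j1 (le_refl _) hw.1 (le_refl _) hw.2
      rcases lt_or_gt_of_ne hab with hlt | hgt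
      · -- delete run
        have hge := pvScanDel_ge m (pvGet2 m 1 j1) i2 (i2 - (i1 + 1)).toNat (i1 + 1)
        have hle := pvScanDel_le m (pvGet2 m 1 j1) i2 (i2 - (i1 + 1)).toNat (i1 + 1)
          (by omega)
        rw [pvRunLoop, if_pos hw, if_pos hlt,
          pvDRun m i2 j2 j1 hw.2 fB i1 hB hw.1 hlt hinv]
        congr 1
        exact ih fB _ j1 (by omega) (by omega)
          (fun x y hx1 hx2 hy1 hy2 => hinv x y (by omega) hx2 hy1 hy2)
      · -- insert run
        have hge := pvScanIns_ge m (pvGet2 m 0 i1) j2 (j2 - (j1 + 1)).toNat (j1 + 1)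
        have hle := pvScanIns_le m (pvGet2 m 0 i1) j2 (j2 - (j1 + 1)).toNat (j1 + 1)
          (by omega)
        rw [pvRunLoop, if_pos hw, if_neg (by omega), if_pos hgt,
          pvIRun m i2 j2 i1 hw.1 fB j1 hB hw.2 hgt hinv]
        congr 1
        exact ih fB i1 _ (by omega) (by omega)
          (fun x y hx1 hx2 hy1 hy2 => hinv x y hx1 hx2 (by omega) hy2)
    · cases fB with
      | zero =>
        have hi : ¬ i1 < i2 := by omega
        have hj : ¬ j1 < j2 := by omega
        rw [pvRunLoop, if_neg hw, if_neg hi, if_neg hj]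
        rfl
      | succ fB =>
        rw [pvRunLoop, if_neg hw, pvBUnits, if_neg hw, pvCoalesce_tail i2 j2 i1 j1]

-- ===== VERDICT (by name: the statement is the Claim_ definition above) =====
theorem transform_opcode_replace_spec : Claim_equal_transform_opcode_replace := by
  intro metadata opcode _ hpre
  unfold Spec_transform_opcode_replace transform_opcode_replace transform_opcode_replace_alt
  obtain ⟨tag, i1, i2, j1, j2⟩ := opcode
  have hdisj : pvDisj metadata i1 i2 j1 j2 := by
    by_cases hw : i1 < i2 ∧ j1 < j2
    · obtain ⟨_, _, _, _, _, hd⟩ := hpre hw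
      exact pvPre_disj metadata i1 i2 j1 j2 hd
    · exact fun x y hx1 hx2 hy1 hy2 => absurd ⟨by omega, by omega⟩ hw
  rw [pvALoop_eq_runloop metadata i2 j2 _ _ i1 j1 (le_refl _) (le_refl _) hdisj,
    pvMain metadata i2 j2 _ _ i1 j1 (le_refl _) (le_refl _) hdisj]
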